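-- pv_equiv track=rewrite | github.com/alexzaitsev/hackerrank | Algorithms/Implementation Challenges/Day of the Programmer/DayoftheProgrammer.py | solve
-- ===== SOURCE A (Python) =====
-- def isLeapJulian(year):
--     return year % 4 == 0
--
-- def isLeapGregorian(year):
--     return year % 400 == 0 or (year % 4 == 0 and year % 100 != 0)
--
-- def solve(year):
--     goal = 256
--     months = [31, 28, 31, 30, 31, 30, 31, 31, 30, 31]
--
--     if (year < 1918 and isLeapJulian(year)) or (year > 1918 and isLeapGregorian(year)):
--         months[1] = 29
--     if year == 1918:
--         months[1] -= 13
--     month = 0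
--     for i in range(len(months)):
--         if goal - months[i] > 0:
--             goal -= months[i]
--         else:
--             month = i + 1
--             break
--
--     return ('0' + str(goal) if goal < 10 else str(goal)) + '.' + ('0' + str(month) if month < 10 else str(month)) + '.' + str(year)
-- ===== SOURCE B (Python) =====
-- def solve(year):
--     # Closed form: the 256th day is always in September.
--     if year == 1918:
--         return '26.09.1918'
--     if (year < 1918 and year % 4 == 0) or \
--        (year > 1918 and (year % 400 == 0 or (year % 4 == 0 and year % 100 != 0))):
--         return '12.09.' + str(year)
--     return '13.09.' + str(year)
-- ===== Notes on version B (the rewrite author's own statement) =====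
-- stated objective: simpler
-- what changed: Replaced the month-accumulation loop and padding logic with a three-branch closed form on the year: the special war year gets its fixed date, leap years (Julian before, Gregorian after) get day 12 of September, all others day 13.
import Mathlib
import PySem

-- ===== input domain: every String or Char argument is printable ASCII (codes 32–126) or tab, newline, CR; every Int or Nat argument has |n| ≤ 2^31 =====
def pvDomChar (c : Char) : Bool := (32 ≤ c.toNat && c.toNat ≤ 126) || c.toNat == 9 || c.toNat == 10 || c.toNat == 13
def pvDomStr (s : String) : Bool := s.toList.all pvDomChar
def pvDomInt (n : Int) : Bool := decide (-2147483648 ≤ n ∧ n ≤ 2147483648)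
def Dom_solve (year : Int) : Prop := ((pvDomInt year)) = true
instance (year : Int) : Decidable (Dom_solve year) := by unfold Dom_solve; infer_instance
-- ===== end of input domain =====

-- B replaces A's month-accumulation loop with a closed-form three-branch answer (objective: simpler).


-- ===== PORT A =====
-- transliteration of A: month list, leap adjustments, accumulation loop with break, padded formatting
def isLeapJulian (year : Int) : Bool := PySem.Int.mod year 4 == 0

def isLeapGregorian (year : Int) : Bool :=
  PySem.Int.mod year 400 == 0 || (PySem.Int.mod year 4 == 0 && PySem.Int.mod year 100 != 0)

-- the 'for i in range(len(months)) … break' loop of A, step for step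
def solveLoop : List Int → Int → Int → Int × Int
  | [], goal, _ => (goal, 0)
  | m :: rest, goal, i =>
    if goal - m > 0 then solveLoop rest (goal - m) (i + 1)
    else (goal, i + 1)

def solve (year : Int) : String :=
  let goal : Int := 256
  let months : List Int := [31, 28, 31, 30, 31, 30, 31, 31, 30, 31]
  let months :=
    if (year < 1918 && isLeapJulian year) || (year > 1918 && isLeapGregorian year) then
      [31, 29, 31, 30, 31, 30, 31, 31, 30, 31]  -- months[1] = 29
    else months
  let months :=
    if year == 1918 then months.set 1 (months[1]! - 13)  -- months[1] -= 13
    else months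
  let (goal, month) := solveLoop months goal 0
  (if goal < 10 then "0" ++ PySem.Int.toStr goal else PySem.Int.toStr goal) ++ "." ++
  (if month < 10 then "0" ++ PySem.Int.toStr month else PySem.Int.toStr month) ++ "." ++
  PySem.Int.toStr year

-- ===== PORT B =====
-- B: closed-form answer, no loop (see Source B)
def solve_alt (year : Int) : String :=
  if year == 1918 then "26.09.1918"
  else if (year < 1918 && PySem.Int.mod year 4 == 0) ||
          (year > 1918 && (PySem.Int.mod year 400 == 0 ||
            (PySem.Int.mod year 4 == 0 && PySem.Int.mod year 100 != 0))) then
    "12.09." ++ PySem.Int.toStr year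
  else "13.09." ++ PySem.Int.toStr year

-- ===== PRECONDITION & SPEC =====
def Spec_solve (year : Int) (out : String) : Prop := out = solve_alt year
instance (year : Int) (out : String) : Decidable (Spec_solve year out) := by unfold Spec_solve; infer_instance

-- ===== CLAIM (what is proved, stated in full; the proofs are below) =====
def Claim_equal_solve : Prop := ∀ (year : Int), Dom_solve year → Spec_solve year (solve year)

-- ===== LEMMAS AND PROOFS =====

-- ===== VERDICT (by name: the statement is the Claim_ definition above) =====
theorem solve_spec : Claim_equal_solve := by
  intro year _
  show solve year = solve_alt year
  by_cases h18 : year = 1918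
  · subst h18; decide
  · have h18' : (year == 1918) = false := by simp [h18]
    simp only [solve, solve_alt, isLeapJulian, isLeapGregorian, h18', Bool.false_eq_true, if_false]
    by_cases hL : (decide (year < 1918) && PySem.Int.mod year 4 == 0 ||
        decide (year > 1918) && (PySem.Int.mod year 400 == 0 ||
          PySem.Int.mod year 4 == 0 && PySem.Int.mod year 100 != 0)) = true
    · simp only [hL, if_true,
        show solveLoop [31, 29, 31, 30, 31, 30, 31, 31, 30, 31] 256 0 = (12, 9) from by decide]
      norm_num
      rfl
    · simp only [hL, if_false, Bool.false_eq_true,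
        show solveLoop [31, 28, 31, 30, 31, 30, 31, 31, 30, 31] 256 0 = (13, 9) from by decide]
      norm_num
      rfl
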